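-- pv_equiv track=rewrite | github.com/LakshmiVinoj/Password-classifier | password_classify.py | check_special_char
-- ===== SOURCE A (Python) =====
-- def check_special_char(n):
--     y=n[0:1]
--     if y=="":
--         return 0
--     if str.isalnum(y):
--         return 0 + check_special_char(n[1:])
--     else:
--         return 1 + check_special_char(n[1:])
-- ===== SOURCE B (Python) =====
-- def check_special_char(n):
--     count = 0
--     for c in n:
--         if not str.isalnum(c):
--             count += 1
--     return count
-- ===== Notes on version B (the rewrite author's own statement) =====
-- stated objective: faster
-- what changed: Replaces the self-recursive first-char-plus-rest formulation (which copies the tail slice on every step, quadratic) with a single iterative pass accumulating a counter.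
import Mathlib
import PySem

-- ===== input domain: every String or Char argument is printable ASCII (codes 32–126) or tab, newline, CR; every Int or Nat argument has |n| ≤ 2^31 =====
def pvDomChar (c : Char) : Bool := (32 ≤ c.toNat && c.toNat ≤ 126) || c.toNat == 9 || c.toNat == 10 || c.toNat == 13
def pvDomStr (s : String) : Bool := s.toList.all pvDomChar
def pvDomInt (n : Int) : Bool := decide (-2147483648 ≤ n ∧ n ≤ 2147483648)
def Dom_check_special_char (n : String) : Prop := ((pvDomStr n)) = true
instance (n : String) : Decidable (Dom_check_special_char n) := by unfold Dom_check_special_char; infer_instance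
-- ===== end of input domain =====

-- B replaces A's self-recursion (first char + recurse on the tail slice) by a single
-- iterative pass with a counter accumulator; same return value on every string.

-- ===== PORT A =====
-- A's recursion on n: y = n[0:1]; empty → 0; else branch on isalnum(y) and recurse on n[1:].
-- On a string, n[0:1] is empty iff the char list is []; isalnum of the 1-char slice is
-- isalnum of the head char; n[1:] is the tail.
def checkA : List Char → Int
  | [] => 0
  | c :: rest =>
      if PySem.Chars.isalnum c then 0 + checkA rest
      else 1 + checkA rest

def check_special_char (n : String) : Int := checkA n.toList

-- ===== PORT B =====
-- count = 0; for c in n: if not isalnum(c): count += 1; return count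
def check_special_char_alt (n : String) : Int :=
  n.toList.foldl (fun count c => if !(PySem.Chars.isalnum c) then count + 1 else count) 0

-- ===== PRECONDITION & SPEC =====
def Spec_check_special_char (n : String) (out : Int) : Prop := out = check_special_char_alt n
instance (n : String) (out : Int) : Decidable (Spec_check_special_char n out) := by unfold Spec_check_special_char; infer_instance

-- ===== CLAIM (what is proved, stated in full; the proofs are below) =====
def Claim_equal_check_special_char : Prop := ∀ (n : String), Dom_check_special_char n → Spec_check_special_char n (check_special_char n)

-- ===== LEMMAS AND PROOFS =====
theorem foldl_eq_checkA (l : List Char) (acc : Int) :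
    l.foldl (fun count c => if !(PySem.Chars.isalnum c) then count + 1 else count) acc
      = acc + checkA l := by
  induction l generalizing acc with
  | nil => simp [checkA]
  | cons c rest ih =>
    rw [List.foldl_cons, ih]
    simp only [checkA]
    by_cases h : PySem.Chars.isalnum c <;> simp [h] <;> ring

-- ===== VERDICT (by name: the statement is the Claim_ definition above) =====
theorem check_special_char_spec : Claim_equal_check_special_char := by
  intro n _
  unfold Spec_check_special_char check_special_char check_special_char_alt
  rw [foldl_eq_checkA]
  ring
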